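-- pv_equiv track=rewrite | github.com/sfgonsio/AI-Legal-Service | contract/v1/harness/run_harness.py | extract_lanes_allowed_roles
-- ===== SOURCE A (Python) =====
-- from typing import Any, Dict, List, Tuple
--
-- def extract_lanes_allowed_roles(yaml_text: str) -> Dict[str, List[str]]:
--     """
--     lane_id -> allowed_callers.roles list
--     (Minimal YAML pattern extraction; no external deps.)
--     """
--     lanes: Dict[str, List[str]] = {}
--     current_lane: str | None = None
--     in_roles_list = False
--
--     for raw in yaml_text.splitlines():
--         line = raw.rstrip()
--
--         if line.strip().startswith("- lane_id:"):
--             current_lane = line.split(":", 1)[1].strip()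
--             lanes[current_lane] = []
--             in_roles_list = False
--             continue
--
--         if current_lane is None:
--             continue
--
--         if line.strip().startswith("roles:"):
--             # roles: [A, B] OR multiline list
--             if "[" in line and "]" in line:
--                 inside = line.split("[", 1)[1].split("]", 1)[0].strip()
--                 lanes[current_lane] = [x.strip() for x in inside.split(",")] if inside else []
--                 in_roles_list = False
--             else:
--                 in_roles_list = True
--             continue
--
--         if in_roles_list:
--             s = line.strip()
--             if s.startswith("- "):
--                 lanes[current_lane].append(s[2:].strip())
--             elif s and not s.startswith("-"):
--                 in_roles_list = False
--
--     return lanes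
-- ===== SOURCE B (Python) =====
-- def extract_lanes_allowed_roles(yaml_text):
--     """lane_id -> allowed_callers.roles list (two-pass: split into lane blocks, then parse each)."""
--     # pass 1: split lines into (lane_id, block-lines) segments at '- lane_id:' markers
--     blocks = []
--     cur_id = None
--     cur_lines = []
--     for raw in yaml_text.splitlines():
--         line = raw.rstrip()
--         if line.strip().startswith("- lane_id:"):
--             if cur_id is not None:
--                 blocks.append((cur_id, cur_lines))
--             cur_id = line.split(":", 1)[1].strip()
--             cur_lines = []
--         elif cur_id is not None:
--             cur_lines.append(line)
--     if cur_id is not None: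
--         blocks.append((cur_id, cur_lines))
--     # pass 2: parse each block independently; later duplicate lane_ids overwrite
--     lanes = {}
--     for lane_id, seg in blocks:
--         lanes[lane_id] = _parse_roles(seg)
--     return lanes
--
--
-- def _parse_roles(seg):
--     roles = []
--     i = 0
--     n = len(seg)
--     while i < n:
--         line = seg[i]
--         if line.strip().startswith("roles:"):
--             if "[" in line and "]" in line:
--                 inside = line.split("[", 1)[1].split("]", 1)[0].strip()
--                 roles = [x.strip() for x in inside.split(",")] if inside else []
--                 i += 1
--             else:
--                 i += 1
--                 # multiline list: collect '- ' items until a terminating line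
--                 while i < n:
--                     s = seg[i].strip()
--                     if s.startswith("roles:"):
--                         break
--                     if s.startswith("- "):
--                         roles.append(s[2:].strip())
--                         i += 1
--                     elif s and not s.startswith("-"):
--                         i += 1
--                         break
--                     else:
--                         i += 1
--         else:
--             i += 1
--     return roles
-- ===== Notes on version B (the rewrite author's own statement) =====
-- stated objective: alternative
-- what changed: Replaces A's single stateful pass (dict + current-lane option + in-roles flag threaded over every line) by a two-pass decomposition: first split the lines into per-lane blocks at '- lane_id:' markers, then parse each block's roles independently with a nested-loop parser that consumes multiline '- ' items in an inner loop instead of a flag.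
import Mathlib
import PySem

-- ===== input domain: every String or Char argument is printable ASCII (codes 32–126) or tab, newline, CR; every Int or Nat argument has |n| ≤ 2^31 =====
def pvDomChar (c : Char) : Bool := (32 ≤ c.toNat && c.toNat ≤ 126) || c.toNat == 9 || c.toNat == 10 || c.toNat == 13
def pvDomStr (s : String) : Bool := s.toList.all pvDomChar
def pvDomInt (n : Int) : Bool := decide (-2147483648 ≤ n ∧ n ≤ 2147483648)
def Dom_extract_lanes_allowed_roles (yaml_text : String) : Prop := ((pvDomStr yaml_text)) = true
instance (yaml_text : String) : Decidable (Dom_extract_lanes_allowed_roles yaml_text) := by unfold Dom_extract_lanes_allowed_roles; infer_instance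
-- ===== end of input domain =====

-- B replaces A's single flag-driven pass by a two-pass decomposition (split into per-lane
-- blocks, then parse each block with a nested-loop roles parser); same result, same cost.

-- ===== PORT A =====
-- state = (lanes dict, current_lane, in_roles_list); one fold over the lines, as in A.
def pvStepA (st : PySem.Dict String (List String) × Option String × Bool) (raw : String) :
    PySem.Dict String (List String) × Option String × Bool :=
  let line := PySem.Str.rstrip raw
  if PySem.Str.startswith (PySem.Str.strip line) "- lane_id:" then
    -- current_lane = line.split(":", 1)[1].strip()  (index 1 exists: the line contains ':')
    let lane := PySem.Str.strip
      (PySem.List.pyGetD ((PySem.Str.splitMax? line ":" 1).getD []) 1 "")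
    (st.1.insert lane [], some lane, false)
  else
    match st.2.1 with
    | none => (st.1, none, st.2.2)
    | some lane =>
      if PySem.Str.startswith (PySem.Str.strip line) "roles:" then
        if PySem.Str.isIn "[" line && PySem.Str.isIn "]" line then
          let inside := PySem.Str.strip
            (PySem.List.pyGetD ((PySem.Str.splitMax?
              (PySem.List.pyGetD ((PySem.Str.splitMax? line "[" 1).getD []) 1 "")
              "]" 1).getD []) 0 "")
          (st.1.insert lane (if inside = "" then []
            else ((PySem.Str.split? inside ",").getD []).map PySem.Str.strip),
           some lane, false)
        else (st.1, some lane, true)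
      else if st.2.2 then
        let s := PySem.Str.strip line
        if PySem.Str.startswith s "- " then
          (st.1.modify lane [] (fun r => r ++ [PySem.Str.strip (PySem.Str.slice s (some 2) none)]),
           some lane, true)
        else if s ≠ "" && !(PySem.Str.startswith s "-") then (st.1, some lane, false)
        else (st.1, some lane, true)
      else (st.1, some lane, false)

def extract_lanes_allowed_roles (yaml_text : String) : List (String × List String) :=
  ((PySem.Str.splitlines yaml_text).foldl pvStepA (PySem.Dict.empty, none, false)).1.items

-- ===== PORT B =====
-- pass 1 of Source B: split the rstripped lines into (lane_id, block lines) at '- lane_id:' markers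
def pvBlocks (lines : List String) (curId : Option String) (curLines : List String) :
    List (String × List String) :=
  match lines with
  | [] => match curId with | none => [] | some i => [(i, curLines)]
  | raw :: rest =>
    let line := PySem.Str.rstrip raw
    if PySem.Str.startswith (PySem.Str.strip line) "- lane_id:" then
      let newId := PySem.Str.strip
        (PySem.List.pyGetD ((PySem.Str.splitMax? line ":" 1).getD []) 1 "")
      match curId with
      | none => pvBlocks rest (some newId) []
      | some i => (i, curLines) :: pvBlocks rest (some newId) []
    else
      match curId with
      | none => pvBlocks rest none curLines
      | some i => pvBlocks rest (some i) (curLines ++ [line])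

-- inner while loop of _parse_roles: collect '- ' items, return (roles, remaining lines)
def pvInner (roles : List String) (seg : List String) : List String × List String :=
  match seg with
  | [] => (roles, [])
  | line :: rest =>
    let s := PySem.Str.strip line
    if PySem.Str.startswith s "roles:" then (roles, line :: rest)
    else if PySem.Str.startswith s "- " then
      pvInner (roles ++ [PySem.Str.strip (PySem.Str.slice s (some 2) none)]) rest
    else if s ≠ "" && !(PySem.Str.startswith s "-") then (roles, rest)
    else pvInner roles rest

-- the inner loop only consumes lines (used for pvOuter's termination)
theorem pvInner_length_le (roles : List String) (seg : List String) :
    (pvInner roles seg).2.length ≤ seg.length := by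
  induction seg generalizing roles with
  | nil => simp [pvInner]
  | cons line rest ih =>
    simp only [pvInner]
    split_ifs <;> simp <;> exact le_trans (ih _) (Nat.le_succ _)

-- outer while loop of _parse_roles
def pvOuter (roles : List String) (seg : List String) : List String :=
  match seg with
  | [] => roles
  | line :: rest =>
    if PySem.Str.startswith (PySem.Str.strip line) "roles:" then
      if PySem.Str.isIn "[" line && PySem.Str.isIn "]" line then
        let inside := PySem.Str.strip
          (PySem.List.pyGetD ((PySem.Str.splitMax?
            (PySem.List.pyGetD ((PySem.Str.splitMax? line "[" 1).getD []) 1 "")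
            "]" 1).getD []) 0 "")
        pvOuter (if inside = "" then []
          else ((PySem.Str.split? inside ",").getD []).map PySem.Str.strip) rest
      else
        let p := pvInner roles rest
        pvOuter p.1 p.2
    else pvOuter roles rest
termination_by seg.length
decreasing_by
  · simp
  · exact Nat.lt_succ_of_le (pvInner_length_le roles rest)
  · simp

def extract_lanes_allowed_roles_alt (yaml_text : String) : List (String × List String) :=
  ((pvBlocks (PySem.Str.splitlines yaml_text) none []).foldl
    (fun d p => d.insert p.1 (pvOuter [] p.2)) PySem.Dict.empty).items

-- ===== PRECONDITION & SPEC =====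
def Spec_extract_lanes_allowed_roles (yaml_text : String) (out : List (String × List String)) : Prop := out = extract_lanes_allowed_roles_alt yaml_text
instance (yaml_text : String) (out : List (String × List String)) : Decidable (Spec_extract_lanes_allowed_roles yaml_text out) := by unfold Spec_extract_lanes_allowed_roles; infer_instance

-- ===== CLAIM (what is proved, stated in full; the proofs are below) =====
def Claim_equal_extract_lanes_allowed_roles : Prop := ∀ (yaml_text : String), Dom_extract_lanes_allowed_roles yaml_text → Spec_extract_lanes_allowed_roles yaml_text (extract_lanes_allowed_roles yaml_text)

-- ===== LEMMAS AND PROOFS =====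

-- the (rstripped) lines of the current block, up to the next '- lane_id:' marker
def pvFirstSeg : List String → List String
  | [] => []
  | raw :: rest =>
    let line := PySem.Str.rstrip raw
    if PySem.Str.startswith (PySem.Str.strip line) "- lane_id:" then []
    else line :: pvFirstSeg rest

-- the dict-building fold of B, as a named abbreviation for the lemmas
def pvBuildB (d : PySem.Dict String (List String)) (bs : List (String × List String)) :
    PySem.Dict String (List String) :=
  bs.foldl (fun d p => d.insert p.1 (pvOuter [] p.2)) d

theorem pvBlocks_some (lines : List String) : ∀ (lane : String) (cl : List String),
    pvBlocks lines (some lane) cl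
      = (lane, cl ++ pvFirstSeg lines) :: pvBlocks lines none [] := by
  induction lines with
  | nil => intro lane cl; simp [pvBlocks, pvFirstSeg]
  | cons raw rest ih =>
    intro lane cl
    by_cases hm : PySem.Str.startswith (PySem.Str.strip (PySem.Str.rstrip raw)) "- lane_id:" = true
    all_goals (have hm' := hm; simp only [PySem.Str.startswith_eq] at hm'; simp at hm')
    · simp [pvBlocks, pvFirstSeg, hm']
    · simp [pvBlocks, pvFirstSeg, hm', ih]

-- modify of an already-inserted key collapses to insert
theorem pvModify_insert (d : PySem.Dict String (List String)) (k : String)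
    (v : List String) (f : List String → List String) :
    (d.insert k v).modify k [] f = d.insert k (f v) := by
  simp [PySem.Dict.modify, PySem.Dict.getD_insert_self, PySem.Dict.insert_insert_self]

-- A's run from a 'current lane' state equals B's block build, for both flag values:
-- flag = false ↔ the outer parser, flag = true ↔ the inner (multiline) parser.
theorem pvMain (lines : List String) :
    (∀ (d : PySem.Dict String (List String)) (lane : String) (roles : List String),
      (lines.foldl pvStepA (d.insert lane roles, some lane, false)).1
        = pvBuildB (d.insert lane (pvOuter roles (pvFirstSeg lines))) (pvBlocks lines none []))
    ∧
    (∀ (d : PySem.Dict String (List String)) (lane : String) (roles : List String),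
      (lines.foldl pvStepA (d.insert lane roles, some lane, true)).1
        = pvBuildB (d.insert lane
            (pvOuter (pvInner roles (pvFirstSeg lines)).1 (pvInner roles (pvFirstSeg lines)).2))
            (pvBlocks lines none [])) := by
  induction lines with
  | nil =>
    constructor <;> intro d lane roles <;>
      simp [pvBuildB, pvBlocks, pvFirstSeg, pvOuter, pvInner]
  | cons raw rest ih =>
    obtain ⟨ihO, ihI⟩ := ih
    by_cases hm : PySem.Str.startswith (PySem.Str.strip (PySem.Str.rstrip raw)) "- lane_id:" = true
    all_goals (have hm' := hm; simp at hm')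
    · -- a new '- lane_id:' marker: both flags reduce to the outer lemma on the new lane
      constructor <;> intro d lane roles <;>
        simp [List.foldl_cons, pvStepA, hm', ihO, pvFirstSeg, pvOuter, pvInner,
          pvBlocks, pvBlocks_some, pvBuildB]
    · by_cases hr : PySem.Str.startswith (PySem.Str.strip (PySem.Str.rstrip raw)) "roles:" = true
      all_goals (have hr' := hr; simp at hr')
      · -- a 'roles:' line: inline list or start of a multiline list
        constructor <;> intro d lane roles <;>
        · simp only [List.foldl_cons, pvStepA, hm, hr, if_pos, if_neg, Bool.false_eq_true,
            not_false_eq_true]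
          simp [pvFirstSeg, pvOuter, pvInner, pvBlocks, hm', hr']
          split_ifs with hb h2 <;>
            first
              | exact ihI d lane roles
              | simp [PySem.Dict.insert_insert_self, ihO, pvBuildB]
      · constructor
        · -- not in list mode: the line is ignored
          intro d lane roles
          simp [List.foldl_cons, pvStepA, hm', hr', ihO,
            pvFirstSeg, pvOuter, pvBlocks, pvBuildB]
        · -- in list mode: item / terminator / skipped line
          intro d lane roles
          by_cases hi : PySem.Str.startswith (PySem.Str.strip (PySem.Str.rstrip raw)) "- " = true
          all_goals (have hi' := hi; simp at hi')
          · simp [List.foldl_cons, pvStepA, hm', hr', hi', pvModify_insert, ihI,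
              pvFirstSeg, pvInner, pvBlocks, pvBuildB]
          · -- terminator line or a skipped line
            simp only [List.foldl_cons, pvStepA, hm, hr, hi, if_pos, if_neg,
              Bool.false_eq_true, not_false_eq_true]
            simp [pvFirstSeg, pvInner, pvBlocks, hm', hr', hi']
            split_ifs with ht
            · simp [ihO, pvBuildB]
            · simp [ihI, pvBuildB]

-- A's run from the initial 'no current lane' state equals B's block build
theorem pvNone (lines : List String) : ∀ (d : PySem.Dict String (List String)) (flag : Bool),
    (lines.foldl pvStepA (d, none, flag)).1 = pvBuildB d (pvBlocks lines none []) := by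
  induction lines with
  | nil => intro d flag; simp [pvBuildB, pvBlocks]
  | cons raw rest ih =>
    intro d flag
    by_cases hm : PySem.Str.startswith (PySem.Str.strip (PySem.Str.rstrip raw)) "- lane_id:" = true
    all_goals (have hm' := hm; simp at hm')
    · simp [List.foldl_cons, pvStepA, hm', (pvMain rest).1,
        pvBlocks, pvBlocks_some, pvBuildB]
    · simp [List.foldl_cons, pvStepA, hm', ih, pvBlocks, pvBuildB]

-- ===== VERDICT (by name: the statement is the Claim_ definition above) =====
theorem extract_lanes_allowed_roles_spec : Claim_equal_extract_lanes_allowed_roles := by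
  intro yaml_text _
  unfold Spec_extract_lanes_allowed_roles extract_lanes_allowed_roles extract_lanes_allowed_roles_alt
  rw [pvNone]
  rfl
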